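-- pv_equiv track=rewrite | github.com/LakshmiTeja17/AI_Algos | Programing Assignment 6/bayesian.py | computeMarkovBlanket
-- ===== SOURCE A (Python) =====
-- def computeMarkovBlanket( network, node):
-- 	blanket = []
-- 	parent_list, cpt_list = network
-- 	blanket.extend( parent_list[node])
-- 	children = []
-- 	for n in parent_list:
-- 		for parent in parent_list[n]:
-- 			if( parent == node):
-- 				children.append(n)
-- 				break
--
-- 	for child in children:
-- 		blanket.extend( parent_list[child])
-- 		blanket.append(child)
--
-- 	blanket = list(set(blanket))
-- 	return blanket
-- ===== SOURCE B (Python) =====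
-- def computeMarkovBlanket(network, node):
--     parent_list, cpt_list = network
--     # Build the reversed adjacency index once: children_of[p] = children of p, in network order.
--     children_of = {}
--     for n, ps in parent_list.items():
--         for p in dict.fromkeys(ps):
--             children_of.setdefault(p, []).append(n)
--     blanket = list(parent_list[node])
--     for child in children_of.get(node, []):
--         blanket.extend(parent_list[child])
--         blanket.append(child)
--     return list(set(blanket))
-- ===== Notes on version B (the rewrite author's own statement) =====
-- stated objective: alternative
-- what changed: A finds children by scanning every node's parent list with an inner break-loop; B instead inverts the graph once into a reversed-adjacency dict (children_of, built by one pass over the edges with setdefault/append) and then reads the children straight from children_of[node], so the per-node parent scan disappears.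
import Mathlib
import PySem

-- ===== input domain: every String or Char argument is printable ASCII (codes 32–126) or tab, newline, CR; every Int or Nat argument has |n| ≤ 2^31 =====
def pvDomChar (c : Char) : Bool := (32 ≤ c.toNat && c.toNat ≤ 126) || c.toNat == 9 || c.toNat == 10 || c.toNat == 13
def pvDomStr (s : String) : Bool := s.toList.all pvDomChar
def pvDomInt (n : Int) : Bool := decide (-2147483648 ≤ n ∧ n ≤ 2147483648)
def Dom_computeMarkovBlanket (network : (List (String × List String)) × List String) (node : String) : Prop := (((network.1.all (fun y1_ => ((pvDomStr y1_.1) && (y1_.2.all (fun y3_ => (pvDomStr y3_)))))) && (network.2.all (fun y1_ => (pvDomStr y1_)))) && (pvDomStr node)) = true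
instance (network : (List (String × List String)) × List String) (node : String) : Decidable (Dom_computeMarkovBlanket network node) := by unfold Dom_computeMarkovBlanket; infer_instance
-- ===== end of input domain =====

-- B replaces A's per-node parent scan (inner break-loop collecting `children`) by a reversed
-- adjacency index built once over the edges; same return value.

-- ===== PORT A =====
-- inner loop: `for parent in parent_list[n]: if parent == node: children.append(n); break`
def pvInnerA (node n : String) (children : List String) : List String → List String
  | [] => children
  | parent :: rest => if parent == node then children ++ [n] else pvInnerA node n children rest

def computeMarkovBlanket (network : (List (String × List String)) × List String) (node : String) : List String :=
  let parent_list : PySem.Dict String (List String) := PySem.Dict.mk network.1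
  -- blanket.extend(parent_list[node])  (Pre_ guarantees the key exists, so getD is exact)
  let blanket : List String := parent_list.getD node []
  let children : List String :=
    parent_list.keys.foldl (fun children n => pvInnerA node n children (parent_list.getD n [])) []
  let blanket : List String :=
    children.foldl (fun b child => (b ++ parent_list.getD child []) ++ [child]) blanket
  PySem.Set.ofList blanket

-- ===== PORT B =====
def computeMarkovBlanket_alt (network : (List (String × List String)) × List String) (node : String) : List String :=
  let parent_list : PySem.Dict String (List String) := PySem.Dict.mk network.1
  -- children_of = {}; for n, ps in items: for p in dict.fromkeys(ps): children_of.setdefault(p, []).append(n)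
  let children_of : PySem.Dict String (List String) :=
    parent_list.items.foldl
      (fun d q => (PySem.List.dedup q.2).foldl (fun d p => d.modify p [] (· ++ [q.1])) d)
      PySem.Dict.empty
  let blanket : List String := parent_list.getD node []
  let blanket : List String :=
    (children_of.getD node []).foldl
      (fun b child => (b ++ parent_list.getD child []) ++ [child]) blanket
  PySem.Set.ofList blanket

-- ===== PRECONDITION & SPEC =====
-- Pre_ excludes (a) inputs where `node` is not a key of parent_list — A raises KeyError there —
-- and (b) association lists with duplicate keys, a corner with no canonical dict reading
-- (Python's dict() collapses duplicates last-wins, the assoc-list model looks up first-match).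
def Pre_computeMarkovBlanket (network : (List (String × List String)) × List String) (node : String) : Prop :=
  (network.1.map Prod.fst).Nodup ∧ node ∈ network.1.map Prod.fst
instance (network : (List (String × List String)) × List String) (node : String) : Decidable (Pre_computeMarkovBlanket network node) := by unfold Pre_computeMarkovBlanket; infer_instance

def pvWitness_computeMarkovBlanket : ((List (String × List String)) × List String) × String :=
  ((([("a", ([] : List String)), ("b", ["a"])]), (["p"] : List String)), "a")

def Spec_computeMarkovBlanket (network : (List (String × List String)) × List String) (node : String) (out : List String) : Prop := out = computeMarkovBlanket_alt network node
instance (network : (List (String × List String)) × List String) (node : String) (out : List String) : Decidable (Spec_computeMarkovBlanket network node out) := by unfold Spec_computeMarkovBlanket; infer_instance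

-- ===== CLAIM (what is proved, stated in full; the proofs are below) =====
def Claim_equal_computeMarkovBlanket : Prop := ∀ (network : (List (String × List String)) × List String) (node : String), Dom_computeMarkovBlanket network node → Pre_computeMarkovBlanket network node → Spec_computeMarkovBlanket network node (computeMarkovBlanket network node)

-- ===== LEMMAS AND PROOFS =====

-- A's inner break-loop appends n exactly when node occurs among the parents.
lemma pvInnerA_eq (node n : String) (cs ps : List String) :
    pvInnerA node n cs ps = if ps.contains node then cs ++ [n] else cs := by
  induction ps with
  | nil => simp [pvInnerA]
  | cons p rest ih =>
    simp only [pvInnerA, List.contains_cons]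
    by_cases h : p = node
    · simp [h]
    · have : node ≠ p := fun hh => h hh.symm
      simp [h, this, ih]

-- A's children loop collects, in order, the first components of the pairs whose value contains node.
lemma childrenA_eq (node : String) (d : PySem.Dict String (List String))
    (l : List (String × List String)) (hl : ∀ p ∈ l, d.getD p.1 [] = p.2) :
    ∀ cs : List String,
      (l.map Prod.fst).foldl (fun cs n => pvInnerA node n cs (d.getD n [])) cs
        = cs ++ (l.filter (fun p => p.2.contains node)).map Prod.fst := by
  induction l with
  | nil => intro cs; simp
  | cons p rest ih =>
    intro cs
    have hp : d.getD p.1 [] = p.2 := hl p (by simp)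
    have hrest : ∀ q ∈ rest, d.getD q.1 [] = q.2 := fun q hq => hl q (by simp [hq])
    simp only [List.map_cons, List.foldl_cons, List.filter_cons]
    rw [pvInnerA_eq, hp]
    by_cases h : p.2.contains node = true
    · rw [if_pos h, if_pos h, ih hrest]; simp
    · rw [if_neg h, if_neg h, ih hrest]

-- On a Nodup list, filtering for one element keeps exactly that element (once) if present.
lemma filter_beq_of_nodup (a : String) (xs : List String) (h : xs.Nodup) :
    xs.filter (· == a) = if a ∈ xs then [a] else [] := by
  induction xs with
  | nil => simp
  | cons x rest ih =>
    rcases List.nodup_cons.mp h with ⟨hx, hr⟩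
    by_cases hxa : x = a
    · subst hxa
      have hrf : rest.filter (· == x) = [] := by
        rw [ih hr]; simp [hx]
      simp [hrf]
    · have hax : ¬a = x := fun hh => hxa hh.symm
      simp [hxa, hax, ih hr]

-- B's inner dedup-loop, read at node: it appends q.1 exactly when node is among q's parents.
lemma getD_inner_fold (node n : String) (ps : List String) (d : PySem.Dict String (List String)) :
    ((PySem.List.dedup ps).foldl (fun d p => d.modify p [] (· ++ [n])) d).getD node []
      = d.getD node [] ++ (if ps.contains node then [n] else []) := by
  have h1 : (PySem.List.dedup ps).foldl (fun d p => d.modify p [] (· ++ [n])) d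
      = ((PySem.List.dedup ps).map (fun p => (p, n))).foldl (fun d q => d.modify q.1 [] (· ++ [q.2])) d := by
    rw [List.foldl_map]
  rw [h1, PySem.Dict.getD_foldl_modify_append]
  congr 1
  have hf : ((PySem.List.dedup ps).map (fun p => (p, n))).filter (fun q => q.1 == node)
      = ((PySem.List.dedup ps).filter (· == node)).map (fun p => (p, n)) := by
    rw [List.filter_map]; rfl
  rw [hf, filter_beq_of_nodup node _ (PySem.List.nodup_dedup ps)]
  simp only [PySem.List.mem_dedup]
  by_cases h : node ∈ ps
  · simp [h, List.contains_eq_mem]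
  · simp [h, List.contains_eq_mem]

-- B's reverse-index build, read at node, yields the same children list as A's scan.
lemma childrenB_eq (node : String) (l : List (String × List String)) :
    ∀ d : PySem.Dict String (List String),
      (l.foldl (fun d q => (PySem.List.dedup q.2).foldl (fun d p => d.modify p [] (· ++ [q.1])) d) d).getD node []
        = d.getD node [] ++ (l.filter (fun p => p.2.contains node)).map Prod.fst := by
  induction l with
  | nil => intro d; simp
  | cons q rest ih =>
    intro d
    simp only [List.foldl_cons, List.filter_cons]
    rw [ih, getD_inner_fold]
    by_cases h : node ∈ q.2
    · simp [h, List.contains_eq_mem]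
    · simp [h, List.contains_eq_mem]

-- ===== VERDICT (by name: the statement is the Claim_ definition above) =====
theorem computeMarkovBlanket_spec : Claim_equal_computeMarkovBlanket := by
  intro network node _hdom hpre
  obtain ⟨hnd, _hmem⟩ := hpre
  unfold Spec_computeMarkovBlanket computeMarkovBlanket computeMarkovBlanket_alt
  set d : PySem.Dict String (List String) := PySem.Dict.mk network.1 with hd
  have hkeys : d.keys = network.1.map Prod.fst := rfl
  have hitems : d.items = network.1 := rfl
  have hndk : d.keys.Nodup := by rw [hkeys]; exact hnd
  have hl : ∀ p ∈ network.1, d.getD p.1 [] = p.2 := by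
    rintro ⟨k, v⟩ hp
    exact PySem.Dict.getD_of_mem_items d (show (k, v) ∈ d.items from hp) hndk []
  simp only [hkeys, hitems]
  rw [childrenA_eq node d network.1 hl, List.nil_append, childrenB_eq node network.1 PySem.Dict.empty,
      PySem.Dict.getD_empty, List.nil_append]
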